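-- pv_equiv track=rewrite | github.com/mithro/ai-shenanigans-for-bmcs | dell-c410x-firmware/pex-i2c-analysis/tools/scan_i2c_patterns.py | find_containing_entry
-- ===== SOURCE A (Python) =====
-- from typing import Optional
--
-- def find_containing_entry(
--     addr: int, ranges: list[tuple[int, int, str]]
-- ) -> Optional[str]:
--     """Binary search for the range containing a given address."""
--     lo, hi = 0, len(ranges) - 1
--     while lo <= hi:
--         mid = (lo + hi) // 2
--         start, end, name = ranges[mid]
--         if addr < start:
--             hi = mid - 1
--         elif addr >= end:
--             lo = mid + 1
--         else:
--             return name
--     return None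
-- ===== SOURCE B (Python) =====
-- from typing import Optional
--
-- def find_containing_entry(
--     addr: int, ranges: list[tuple[int, int, str]]
-- ) -> Optional[str]:
--     """Recursive divide-and-conquer on list slices (same midpoint/comparison order)."""
--     if not ranges:
--         return None
--     mid = (len(ranges) - 1) // 2
--     start, end, name = ranges[mid]
--     if addr < start:
--         return find_containing_entry(addr, ranges[:mid])
--     if addr >= end:
--         return find_containing_entry(addr, ranges[mid + 1:])
--     return name
-- ===== Notes on version B (the rewrite author's own statement) =====
-- stated objective: alternative
-- what changed: Replaced the iterative lo/hi-index binary-search loop by a recursive divide-and-conquer that descends into the actual left/right list slices (same midpoint and comparison order, so identical results even on unsorted input).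
import Mathlib
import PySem

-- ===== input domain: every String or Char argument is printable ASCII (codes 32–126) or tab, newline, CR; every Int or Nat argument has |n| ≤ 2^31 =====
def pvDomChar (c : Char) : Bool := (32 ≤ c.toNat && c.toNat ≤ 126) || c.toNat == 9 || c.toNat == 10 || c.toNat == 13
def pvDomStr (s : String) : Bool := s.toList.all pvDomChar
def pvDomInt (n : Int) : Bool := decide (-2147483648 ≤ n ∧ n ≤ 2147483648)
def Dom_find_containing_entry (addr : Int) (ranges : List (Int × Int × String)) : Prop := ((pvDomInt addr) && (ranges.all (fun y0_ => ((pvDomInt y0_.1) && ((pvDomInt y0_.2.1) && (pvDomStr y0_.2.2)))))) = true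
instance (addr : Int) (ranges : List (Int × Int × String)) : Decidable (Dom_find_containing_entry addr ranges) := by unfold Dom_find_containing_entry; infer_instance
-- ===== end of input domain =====

-- B replaces A's iterative lo/hi-index binary-search loop by a recursive divide-and-conquer
-- on the actual left/right list slices (same midpoint and comparison order): objective 'alternative'.

-- ===== PORT A =====
-- the while-loop of A, state (lo, hi); pyGet? none = IndexError (unreachable from the entry call)
def pvLoopA (addr : Int) (ranges : List (Int × Int × String)) (lo hi : Int) : Option String :=
  if h : lo ≤ hi then
    let mid := PySem.Int.floordiv (lo + hi) 2
    match PySem.List.pyGet? ranges mid with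
    | none => none
    | some (s, e, nm) =>
      if addr < s then pvLoopA addr ranges lo (mid - 1)
      else if addr ≥ e then pvLoopA addr ranges (mid + 1) hi
      else some nm
  else none
termination_by (hi + 1 - lo).toNat
decreasing_by
  · have := PySem.Int.floordiv_two_mid_bounds h; omega
  · have := PySem.Int.floordiv_two_mid_bounds h; omega

def find_containing_entry (addr : Int) (ranges : List (Int × Int × String)) : Option String :=
  pvLoopA addr ranges 0 ((ranges.length : Int) - 1)

-- ===== PORT B =====
-- recursive divide-and-conquer on list slices; ranges[:mid] = take mid, ranges[mid+1:] = drop (mid+1)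
-- (both slice bounds are nonnegative and in range, so Lean's take/drop are exact)
def find_containing_entry_alt (addr : Int) (ranges : List (Int × Int × String)) : Option String :=
  if hne : ranges = [] then none
  else
    let mid : Nat := (ranges.length - 1) / 2
    match ranges[mid]? with
    | none => none  -- unreachable: mid < ranges.length
    | some (s, e, nm) =>
      if addr < s then find_containing_entry_alt addr (ranges.take mid)
      else if e ≤ addr then find_containing_entry_alt addr (ranges.drop (mid + 1))
      else some nm
termination_by ranges.length
decreasing_by
  · have : ranges.length ≠ 0 := by simpa using hne
    simp; omega
  · have : ranges.length ≠ 0 := by simpa using hne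
    simp; omega

-- ===== PRECONDITION & SPEC =====
def Spec_find_containing_entry (addr : Int) (ranges : List (Int × Int × String)) (out : Option String) : Prop := out = find_containing_entry_alt addr ranges
instance (addr : Int) (ranges : List (Int × Int × String)) (out : Option String) : Decidable (Spec_find_containing_entry addr ranges out) := by unfold Spec_find_containing_entry; infer_instance

-- ===== CLAIM (what is proved, stated in full; the proofs are below) =====
def Claim_equal_find_containing_entry : Prop := ∀ (addr : Int) (ranges : List (Int × Int × String)), Dom_find_containing_entry addr ranges → Spec_find_containing_entry addr ranges (find_containing_entry addr ranges)

-- ===== LEMMAS AND PROOFS =====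

lemma pvLoopA_eq_alt (addr : Int) (ranges : List (Int × Int × String)) :
    ∀ (N : Nat) (lo hi : Int), (hi + 1 - lo).toNat ≤ N → 0 ≤ lo → hi < (ranges.length : Int) →
      pvLoopA addr ranges lo hi
        = find_containing_entry_alt addr ((ranges.drop lo.toNat).take (hi + 1 - lo).toNat) := by
  intro N
  induction N with
  | zero =>
    intro lo hi hN hlo hhi
    have hgt : hi < lo := by omega
    rw [pvLoopA, dif_neg (by omega)]
    have h0 : (hi + 1 - lo).toNat = 0 := by omega
    rw [h0]
    simp [find_containing_entry_alt]
  | succ n ih =>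
    intro lo hi hN hlo hhi
    by_cases hle : lo ≤ hi
    · have hmid := PySem.Int.floordiv_two_mid_bounds hle
      set midA := PySem.Int.floordiv (lo + hi) 2 with hmidA
      have hmidA' : midA = (lo + hi) / 2 := by
        rw [hmidA, PySem.Int.floordiv_eq_ediv_of_pos (by omega)]
      -- the segment B recurses on
      set l := (ranges.drop lo.toNat).take (hi + 1 - lo).toNat with hl
      have hlen : l.length = (hi + 1 - lo).toNat := by
        rw [hl]; simp; omega
      have hlne : l ≠ [] := by
        intro h; rw [h] at hlen; simp at hlen; omega
      set midB : Nat := (l.length - 1) / 2 with hmidB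
      have hmids : (midB : Int) = midA - lo := by
        rw [hmidB, hlen, hmidA']; omega
      -- the two fetches agree
      have hfetch : l[midB]? = PySem.List.pyGet? ranges midA := by
        have hg : PySem.List.pyGet? ranges midA = ranges[midA.toNat]? :=
          PySem.List.pyGet?_of_nonneg _ (by omega)
        rw [hg, hl, List.getElem?_take_of_lt (by omega), List.getElem?_drop]
        congr 1; omega
      clear_value midA l midB
      rw [pvLoopA, dif_pos hle]
      rw [find_containing_entry_alt, dif_neg hlne]
      simp only [← hmidA, ← hl, ← hmidB, ← hfetch]
      cases hget : l[midB]? with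
      | none =>
        -- impossible: midB < l.length
        exfalso
        have : midB < l.length := by omega
        rw [List.getElem?_eq_none_iff] at hget; omega
      | some r =>
        obtain ⟨s, e, nm⟩ := r
        simp only
        by_cases h1 : addr < s
        · rw [if_pos h1, if_pos h1]
          have := ih lo (midA - 1) (by omega) hlo (by omega)
          have e3 : (midA - 1 + 1 - lo).toNat = min midB (hi + 1 - lo).toNat := by omega
          rw [this, hl, List.take_take, e3]
        · rw [if_neg h1, if_neg h1]
          by_cases h2 : e ≤ addr
          · rw [if_pos h2, if_pos h2]
            have := ih (midA + 1) hi (by omega) (by omega) hhi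
            have e1 : (midA + 1).toNat = lo.toNat + (midB + 1) := by omega
            have e2 : (hi + 1 - (midA + 1)).toNat = (hi + 1 - lo).toNat - (midB + 1) := by omega
            rw [this, hl, List.drop_take, List.drop_drop, e1, e2]
          · rw [if_neg h2, if_neg h2]
    · rw [pvLoopA, dif_neg hle]
      have h0 : (hi + 1 - lo).toNat = 0 := by omega
      rw [h0]
      simp [find_containing_entry_alt]

-- ===== VERDICT (by name: the statement is the Claim_ definition above) =====
theorem find_containing_entry_spec : Claim_equal_find_containing_entry := by
  intro addr ranges _
  unfold Spec_find_containing_entry find_containing_entry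
  have h := pvLoopA_eq_alt addr ranges (ranges.length + 1) 0 ((ranges.length : Int) - 1)
    (by omega) (by omega) (by omega)
  rw [h]
  congr 1
  have h0 : ((ranges.length : Int) - 1 + 1 - (0:Int)).toNat = ranges.length := by omega
  simp [h0]
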